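-- pv_equiv track=rewrite | github.com/GundalaNikhil/DSA | dsa-problems/Hashing/testcases/tc_generator/generate_all_hashing_comprehensive.py | solve_hsh002
-- ===== SOURCE A (Python) =====
-- from typing import List, Tuple, Dict, Any
--
-- MOD1 = 10**9 + 7
--
-- BASE1 = 313
--
-- MOD2 = 10**9 + 9
--
-- BASE2 = 317
--
-- def compute_powers(length: int, base: int, mod: int) -> List[int]:
--     """Compute powers of base mod mod"""
--     powers = [1]
--     for i in range(length):
--         powers.append((powers[-1] * base) % mod)
--     return powers
--
-- def solve_hsh002(s: str, queries: List[Tuple[int, int, int, int]]) -> List[bool]: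
--     """
--     Check if substrings s[l1:r1+1] == s[l2:r2+1] for each query
--     Uses double hashing to minimize collisions
--     """
--     n = len(s)
--
--     # Build prefix hashes for both hash functions
--     h1 = [0]
--     h2 = [0]
--     p1 = compute_powers(n, BASE1, MOD1)
--     p2 = compute_powers(n, BASE2, MOD2)
--
--     hash1 = 0
--     hash2 = 0
--     for char in s:
--         hash1 = (hash1 * BASE1 + ord(char)) % MOD1
--         hash2 = (hash2 * BASE2 + ord(char)) % MOD2
--         h1.append(hash1)
--         h2.append(hash2)
--
--     results = []
--     for l1, r1, l2, r2 in queries: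
--         # Check lengths
--         if r1 - l1 != r2 - l2:
--             results.append(False)
--             continue
--
--         # Get hashes with both hash functions
--         len_sub = r1 - l1 + 1
--         hash1_sub1 = (h1[r1+1] - h1[l1] * p1[len_sub]) % MOD1
--         hash1_sub2 = (h1[r2+1] - h1[l2] * p1[len_sub]) % MOD1
--
--         hash2_sub1 = (h2[r1+1] - h2[l1] * p2[len_sub]) % MOD2
--         hash2_sub2 = (h2[r2+1] - h2[l2] * p2[len_sub]) % MOD2
--
--         # Both hashes must match
--         results.append(hash1_sub1 == hash1_sub2 and hash2_sub1 == hash2_sub2)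
--
--     return results
-- ===== SOURCE B (Python) =====
-- from typing import List, Tuple
--
-- MOD1 = 10**9 + 7
-- BASE1 = 313
-- MOD2 = 10**9 + 9
-- BASE2 = 317
--
-- def _hsub(s, l, r, base, mod):
--     h = 0
--     for i in range(l, r + 1):
--         h = (h * base + ord(s[i])) % mod
--     return h
--
-- def solve_hsh002(s: str, queries: List[Tuple[int, int, int, int]]) -> List[bool]:
--     return [
--         r1 - l1 == r2 - l2
--         and _hsub(s, l1, r1, BASE1, MOD1) == _hsub(s, l2, r2, BASE1, MOD1)
--         and _hsub(s, l1, r1, BASE2, MOD2) == _hsub(s, l2, r2, BASE2, MOD2)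
--         for (l1, r1, l2, r2) in queries
--     ]
-- ===== Notes on version B (the rewrite author's own statement) =====
-- stated objective: simpler
-- what changed: Dropped the precomputed power tables and prefix-hash arrays entirely; B answers each query by directly Horner-hashing the two substrings (both moduli) and comparing, via one short helper.
-- outside the precondition, e.g. on solve_hsh002('babab', [(0, 0, -1, -1)]): A returns [False], B returns [True]; on solve_hsh002('abb', [(0, -3, 1, -2)]): A returns [False], B returns [True]
import Mathlib
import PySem

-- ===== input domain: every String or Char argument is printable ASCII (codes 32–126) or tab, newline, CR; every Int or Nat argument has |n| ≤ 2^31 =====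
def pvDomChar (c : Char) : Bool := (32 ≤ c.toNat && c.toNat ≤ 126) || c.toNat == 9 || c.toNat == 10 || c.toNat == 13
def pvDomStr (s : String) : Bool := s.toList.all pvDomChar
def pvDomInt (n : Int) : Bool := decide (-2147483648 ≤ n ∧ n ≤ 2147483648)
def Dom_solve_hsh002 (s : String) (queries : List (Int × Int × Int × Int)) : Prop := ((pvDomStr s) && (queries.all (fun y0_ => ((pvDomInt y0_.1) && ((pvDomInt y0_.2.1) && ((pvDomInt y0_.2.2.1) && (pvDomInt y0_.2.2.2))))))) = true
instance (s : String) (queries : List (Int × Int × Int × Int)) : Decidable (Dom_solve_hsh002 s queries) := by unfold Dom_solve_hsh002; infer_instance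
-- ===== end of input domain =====

-- B replaces A's precomputed power/prefix-hash tables with a direct per-query Horner
-- hash of each substring (objective: simpler — no tables, one short helper).
-- ===== PORT A =====
def pvMOD1 : Int := 1000000007
def pvBASE1 : Int := 313
def pvMOD2 : Int := 1000000009
def pvBASE2 : Int := 317

def compute_powers (length : Int) (base : Int) (mod : Int) : List Int :=
  (PySem.List.pyRange 0 length 1).foldl
    (fun powers _ => powers ++ [PySem.Int.mod (PySem.List.pyGetD powers (-1) 0 * base) mod])
    [1]

-- the body of A's `for char in s` loop (state: hash1, hash2, h1, h2)
def pvStepA (st : Int × Int × List Int × List Int) (ch : Char) : Int × Int × List Int × List Int :=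
  let hash1 := PySem.Int.mod (st.1 * pvBASE1 + (ch.toNat : Int)) pvMOD1
  let hash2 := PySem.Int.mod (st.2.1 * pvBASE2 + (ch.toNat : Int)) pvMOD2
  (hash1, hash2, st.2.2.1 ++ [hash1], st.2.2.2 ++ [hash2])

def solve_hsh002 (s : String) (queries : List (Int × Int × Int × Int)) : List Bool :=
  let cs := s.toList
  let n : Int := (cs.length : Int)
  let p1 := compute_powers n pvBASE1 pvMOD1
  let p2 := compute_powers n pvBASE2 pvMOD2
  let st := cs.foldl pvStepA (0, 0, ([0] : List Int), ([0] : List Int))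
  let h1 := st.2.2.1
  let h2 := st.2.2.2
  queries.foldl
    (fun results q =>
      let l1 := q.1; let r1 := q.2.1; let l2 := q.2.2.1; let r2 := q.2.2.2
      if r1 - l1 ≠ r2 - l2 then results ++ [false]
      else
        let len_sub := r1 - l1 + 1
        let hash1_sub1 := PySem.Int.mod (PySem.List.pyGetD h1 (r1+1) 0 - PySem.List.pyGetD h1 l1 0 * PySem.List.pyGetD p1 len_sub 0) pvMOD1
        let hash1_sub2 := PySem.Int.mod (PySem.List.pyGetD h1 (r2+1) 0 - PySem.List.pyGetD h1 l2 0 * PySem.List.pyGetD p1 len_sub 0) pvMOD1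
        let hash2_sub1 := PySem.Int.mod (PySem.List.pyGetD h2 (r1+1) 0 - PySem.List.pyGetD h2 l1 0 * PySem.List.pyGetD p2 len_sub 0) pvMOD2
        let hash2_sub2 := PySem.Int.mod (PySem.List.pyGetD h2 (r2+1) 0 - PySem.List.pyGetD h2 l2 0 * PySem.List.pyGetD p2 len_sub 0) pvMOD2
        results ++ [decide (hash1_sub1 = hash1_sub2 ∧ hash2_sub1 = hash2_sub2)])
    []

-- ===== PORT B =====
-- B's helper _hsub: Horner hash of s[l..r] (inclusive), scanning the indices directly
def pvHsub (cs : List Char) (l r base mod : Int) : Int :=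
  (PySem.List.pyRange l (r + 1) 1).foldl
    (fun h i => PySem.Int.mod (h * base + ((PySem.List.pyGetD cs i ' ').toNat : Int)) mod) 0

def solve_hsh002_alt (s : String) (queries : List (Int × Int × Int × Int)) : List Bool :=
  queries.map (fun q =>
    decide (q.2.1 - q.1 = q.2.2.2 - q.2.2.1) &&
    decide (pvHsub s.toList q.1 q.2.1 pvBASE1 pvMOD1 = pvHsub s.toList q.2.2.1 q.2.2.2 pvBASE1 pvMOD1) &&
    decide (pvHsub s.toList q.1 q.2.1 pvBASE2 pvMOD2 = pvHsub s.toList q.2.2.1 q.2.2.2 pvBASE2 pvMOD2))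

-- ===== PRECONDITION & SPEC =====
-- Pre_ excludes queries of equal claimed length whose bounds are not genuine in-range
-- substring bounds (0 ≤ l ≤ r < len(s)): there A either raises IndexError or reads its
-- tables through Python's accidental negative-index wraparound.
def Pre_solve_hsh002 (s : String) (queries : List (Int × Int × Int × Int)) : Prop :=
  ∀ q ∈ queries, q.2.1 - q.1 = q.2.2.2 - q.2.2.1 →
    (0 ≤ q.1 ∧ q.1 ≤ q.2.1 ∧ q.2.1 < (s.toList.length : Int) ∧
     0 ≤ q.2.2.1 ∧ q.2.2.1 ≤ q.2.2.2 ∧ q.2.2.2 < (s.toList.length : Int))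
instance (s : String) (queries : List (Int × Int × Int × Int)) : Decidable (Pre_solve_hsh002 s queries) := by unfold Pre_solve_hsh002; infer_instance

def pvWitness_solve_hsh002 : String × (List (Int × Int × Int × Int)) :=
  ("abab", [(0, 1, 2, 3), (0, 0, 3, 3), (0, 1, 0, 2)])

def Spec_solve_hsh002 (s : String) (queries : List (Int × Int × Int × Int)) (out : List Bool) : Prop := out = solve_hsh002_alt s queries
instance (s : String) (queries : List (Int × Int × Int × Int)) (out : List Bool) : Decidable (Spec_solve_hsh002 s queries out) := by unfold Spec_solve_hsh002; infer_instance

-- ===== CLAIM (what is proved, stated in full; the proofs are below) =====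
def Claim_equal_solve_hsh002 : Prop := ∀ (s : String) (queries : List (Int × Int × Int × Int)), Dom_solve_hsh002 s queries → Pre_solve_hsh002 s queries → Spec_solve_hsh002 s queries (solve_hsh002 s queries)

-- ===== LEMMAS AND PROOFS =====

-- mod-Horner hash of a char list from accumulator a (the value both loops maintain)
def pvHm (b m a : Int) (cs : List Char) : Int :=
  cs.foldl (fun h c => PySem.Int.mod (h * b + (c.toNat : Int)) m) a

-- raw (unreduced) Horner value
def pvHraw (b a : Int) (cs : List Char) : Int :=
  cs.foldl (fun h c => h * b + (c.toNat : Int)) a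

-- list of prefix hashes that A's character loop appends
def pvHpref (b m a : Int) : List Char → List Int
  | [] => []
  | c :: cs =>
      let a' := PySem.Int.mod (a * b + (c.toNat : Int)) m
      a' :: pvHpref b m a' cs

theorem pvHraw_shift (b : Int) (cs : List Char) : ∀ a, pvHraw b a cs = a * b ^ cs.length + pvHraw b 0 cs := by
  induction cs with
  | nil => intro a; simp [pvHraw]
  | cons c cs ih =>
      intro a
      have h1 := ih (a * b + (c.toNat : Int))
      have h2 := ih ((0 : Int) * b + (c.toNat : Int))
      simp only [pvHraw, List.foldl_cons] at h1 h2 ⊢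
      rw [h1, h2]
      simp [List.length_cons, pow_succ]
      ring

theorem pvHm_modeq' (b m : Int) (hm : 0 < m) (cs : List Char) :
    ∀ a a', a % m = a' % m → pvHm b m a cs % m = pvHraw b a' cs % m := by
  induction cs with
  | nil => intro a a' h; simpa [pvHm, pvHraw] using h
  | cons c cs ih =>
      intro a a' h
      simp only [pvHm, pvHraw, List.foldl_cons] at *
      apply ih
      rw [PySem.Int.mod_eq_emod_of_pos hm]
      rw [Int.emod_emod_of_dvd _ dvd_rfl]
      exact ((Int.ModEq.mul_right b h).add_right _ : _ % m = _ % m)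

theorem pvHm_modeq (b m : Int) (hm : 0 < m) (cs : List Char) (a : Int) :
    pvHm b m a cs % m = pvHraw b a cs % m :=
  pvHm_modeq' b m hm cs a a rfl

theorem pvHm_bounds' (b m : Int) (hm : 0 < m) (cs : List Char) :
    ∀ a, 0 ≤ a → a < m → 0 ≤ pvHm b m a cs ∧ pvHm b m a cs < m := by
  induction cs with
  | nil => intro a h0 h1; simpa [pvHm] using ⟨h0, h1⟩
  | cons c cs ih =>
      intro a h0 h1
      simp only [pvHm, List.foldl_cons] at *
      exact ih _ (PySem.Int.mod_nonneg _ hm) (PySem.Int.mod_lt _ hm)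

theorem pvHm_bounds (b m : Int) (hm : 0 < m) (cs : List Char) :
    0 ≤ pvHm b m 0 cs ∧ pvHm b m 0 cs < m :=
  pvHm_bounds' b m hm cs 0 le_rfl hm

theorem pvHpref_getElem (b m : Int) (cs : List Char) :
    ∀ (i : Nat) (a : Int), i < cs.length → (pvHpref b m a cs)[i]? = some (pvHm b m a (cs.take (i + 1))) := by
  induction cs with
  | nil => intro i a h; simp at h
  | cons c cs ih =>
      intro i a h
      cases i with
      | zero => simp [pvHpref, pvHm]
      | succ i => simpa [pvHpref, pvHm] using ih i _ (by simpa using h)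

-- indexing into A's h-list ([0] ++ prefix hashes)
theorem pvHlist_getD (b m : Int) (cs : List Char) (i : Int) (h0 : 0 ≤ i) (h1 : i ≤ (cs.length : Int)) :
    PySem.List.pyGetD ((0 : Int) :: pvHpref b m 0 cs) i 0 = pvHm b m 0 (cs.take i.toNat) := by
  rw [PySem.List.pyGetD_of_nonneg _ _ h0]
  cases hj : i.toNat with
  | zero => simp [pvHm]
  | succ j =>
      have hjlt : j < cs.length := by omega
      rw [List.getD_cons_succ, List.getD_eq_getElem?_getD, pvHpref_getElem b m cs j 0 hjlt]
      simp

theorem pvStepA_fold (cs : List Char) :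
    ∀ a1 a2 l1 l2, cs.foldl pvStepA (a1, a2, l1, l2) =
      (pvHm pvBASE1 pvMOD1 a1 cs, pvHm pvBASE2 pvMOD2 a2 cs,
       l1 ++ pvHpref pvBASE1 pvMOD1 a1 cs, l2 ++ pvHpref pvBASE2 pvMOD2 a2 cs) := by
  induction cs with
  | nil => intro a1 a2 l1 l2; simp [pvHm, pvHpref]
  | cons c cs ih =>
      intro a1 a2 l1 l2
      simp only [List.foldl_cons]
      rw [show pvStepA (a1, a2, l1, l2) c =
        (PySem.Int.mod (a1 * pvBASE1 + (c.toNat : Int)) pvMOD1,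
         PySem.Int.mod (a2 * pvBASE2 + (c.toNat : Int)) pvMOD2,
         l1 ++ [PySem.Int.mod (a1 * pvBASE1 + (c.toNat : Int)) pvMOD1],
         l2 ++ [PySem.Int.mod (a2 * pvBASE2 + (c.toNat : Int)) pvMOD2]) from rfl]
      rw [ih]
      simp [pvHm, pvHpref]

theorem compute_powers_eq (b m : Int) (hm : 1 < m) (N : Nat) :
    compute_powers (N : Int) b m = (List.range (N + 1)).map (fun k => b ^ k % m) := by
  induction N with
  | zero =>
      have h1 : (1 : Int) % m = 1 := Int.emod_eq_of_lt (by omega) hm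
      simp [compute_powers, h1]
  | succ N ih =>
      unfold compute_powers at *
      rw [show ((N + 1 : Nat) : Int) = (N : Int) + 1 by push_cast; ring,
        PySem.List.pyRange_one_succ_right (by positivity), List.foldl_append, ih]
      rw [List.range_succ]
      simp only [List.foldl_cons, List.foldl_nil, List.map_append, List.map_cons, List.map_nil,
        PySem.List.pyGetD_neg_one_append_singleton]
      rw [List.range_succ (n := N + 1), List.map_append, List.map_cons, List.map_nil]
      congr 1
      · rw [List.range_succ, List.map_append, List.map_cons, List.map_nil]
      · rw [PySem.Int.mod_eq_emod_of_pos (by omega), pow_succ]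
        conv_rhs => rw [Int.mul_emod]
        conv_lhs => rw [Int.mul_emod]
        rw [Int.emod_emod_of_dvd _ dvd_rfl]

theorem compute_powers_getD (b m : Int) (hm : 1 < m) (N : Nat) (k : Int) (hk0 : 0 ≤ k) (hkN : k ≤ (N : Int)) :
    PySem.List.pyGetD (compute_powers (N : Int) b m) k 0 = b ^ k.toNat % m := by
  rw [compute_powers_eq b m hm N, PySem.List.pyGetD_of_nonneg _ _ hk0,
    PySem.List.getD_map_range _ _ _ _ (by omega)]

theorem pvHsub_aux (cs : List Char) (b m : Int) :
    ∀ (k : Nat) (l acc : Int), 0 ≤ l → l.toNat + k ≤ cs.length →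
      (PySem.List.pyRange l (l + (k : Int)) 1).foldl
        (fun h i => PySem.Int.mod (h * b + ((PySem.List.pyGetD cs i ' ').toNat : Int)) m) acc
      = pvHm b m acc ((cs.drop l.toNat).take k) := by
  intro k
  induction k with
  | zero => intro l acc h0 hlen; simp [PySem.List.pyRange_one_eq_nil (le_refl l), pvHm]
  | succ k ih =>
      intro l acc h0 hlen
      have hlt : l.toNat < cs.length := by omega
      rw [show l + ((k + 1 : Nat) : Int) = (l + 1) + (k : Int) by push_cast; ring]
      rw [PySem.List.pyRange_one_cons (by omega), List.foldl_cons]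
      rw [PySem.List.pyGetD_of_nonneg _ _ h0, List.getD_eq_getElem?_getD,
        List.getElem?_eq_getElem hlt]
      rw [ih (l + 1) _ (by omega) (by omega)]
      rw [List.drop_eq_getElem_cons hlt, List.take_succ_cons]
      rw [show (l + 1).toNat = l.toNat + 1 by omega]
      simp [pvHm]

-- B's index loop computes the mod-Horner hash of the segment
theorem pvHsub_eq_seg (cs : List Char) (b m : Int) (l r : Int) (h0 : 0 ≤ l) (hlr : l ≤ r + 1)
    (hr : r < (cs.length : Int)) :
    pvHsub cs l r b m = pvHm b m 0 ((cs.drop l.toNat).take (r + 1 - l).toNat) := by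
  unfold pvHsub
  have hrng : PySem.List.pyRange l (r + 1) 1 = PySem.List.pyRange l (l + ((r + 1 - l).toNat : Int)) 1 := by
    congr 1
    omega
  rw [hrng]
  exact pvHsub_aux cs b m (r + 1 - l).toNat l 0 h0 (by omega)

-- A's prefix-hash difference equals the segment's mod-Horner hash
theorem pvA_hash_eq (b m : Int) (hm : 1 < m) (cs : List Char) (l r k : Int)
    (hk : k = r - l + 1) (h0 : 0 ≤ l) (hlr : l ≤ r) (hr : r < (cs.length : Int)) :
    PySem.Int.mod (PySem.List.pyGetD ((0 : Int) :: pvHpref b m 0 cs) (r + 1) 0 -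
        PySem.List.pyGetD ((0 : Int) :: pvHpref b m 0 cs) l 0 *
          PySem.List.pyGetD (compute_powers ((cs.length : Nat) : Int) b m) k 0) m
      = pvHm b m 0 ((cs.drop l.toNat).take (r + 1 - l).toNat) := by
  subst hk
  have hm0 : (0 : Int) < m := by omega
  rw [pvHlist_getD b m cs (r + 1) (by omega) (by omega),
    pvHlist_getD b m cs l h0 (by omega),
    compute_powers_getD b m hm cs.length (r - l + 1) (by omega) (by omega)]
  have htake : (r + 1).toNat = l.toNat + (r + 1 - l).toNat := by omega
  have hkk : (r - l + 1).toNat = (r + 1 - l).toNat := by omega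
  rw [htake, hkk, List.take_add]
  set P := cs.take l.toNat with hP
  set S := (cs.drop l.toNat).take (r + 1 - l).toNat with hS
  have hPS : pvHm b m 0 (P ++ S) = pvHm b m (pvHm b m 0 P) S := by
    simp [pvHm, List.foldl_append]
  rw [hPS]
  set x := pvHm b m 0 P with hx
  have hSlen : S.length = (r + 1 - l).toNat := by
    rw [hS]
    rw [List.length_take, List.length_drop]
    omega
  obtain ⟨hy0, hym⟩ := pvHm_bounds b m hm0 S
  rw [PySem.Int.mod_eq_emod_of_pos hm0]
  have e1 : pvHm b m x S % m = (x * b ^ (r + 1 - l).toNat + pvHraw b 0 S) % m := by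
    rw [pvHm_modeq b m hm0 S x, pvHraw_shift b S x, hSlen]
  have e2 : x * (b ^ (r + 1 - l).toNat % m) % m = x * b ^ (r + 1 - l).toNat % m :=
    Int.ModEq.mul_left x (Int.emod_emod_of_dvd _ dvd_rfl)
  have e3 := (Int.ModEq.sub (e1 : Int.ModEq m _ _) (e2 : Int.ModEq m _ _))
  have e4 : x * b ^ (r + 1 - l).toNat + pvHraw b 0 S - x * b ^ (r + 1 - l).toNat
      = pvHraw b 0 S := by ring
  rw [e4] at e3
  have e5 : pvHraw b 0 S % m = pvHm b m 0 S % m := (pvHm_modeq b m hm0 S 0).symm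
  rw [(e3 : _ % m = _ % m), e5, Int.emod_eq_of_lt hy0 hym]

-- A's query loop ('results.append(...)') as a map, given the body appends one element per query
theorem pvFoldEq {α β : Type} (l : List α) (fA : List β → α → List β) (fB : α → β)
    (h : ∀ res q, q ∈ l → fA res q = res ++ [fB q]) :
    ∀ acc, l.foldl fA acc = acc ++ l.map fB := by
  induction l with
  | nil => intro acc; simp
  | cons q qs ih =>
      intro acc
      simp only [List.foldl_cons, List.map_cons]
      rw [h acc q (by simp), ih (fun res q hq => h res q (by simp [hq])) _]
      simp

-- ===== VERDICT (by name: the statement is the Claim_ definition above) =====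
theorem solve_hsh002_spec : Claim_equal_solve_hsh002 := by
  intro s queries _ hpre
  unfold Spec_solve_hsh002
  simp only [solve_hsh002, solve_hsh002_alt, pvStepA_fold, List.singleton_append]
  refine Eq.trans (pvFoldEq queries _
    (fun q =>
      decide (q.2.1 - q.1 = q.2.2.2 - q.2.2.1) &&
      decide (pvHsub s.toList q.1 q.2.1 pvBASE1 pvMOD1 = pvHsub s.toList q.2.2.1 q.2.2.2 pvBASE1 pvMOD1) &&
      decide (pvHsub s.toList q.1 q.2.1 pvBASE2 pvMOD2 = pvHsub s.toList q.2.2.1 q.2.2.2 pvBASE2 pvMOD2))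
    ?_ []) (List.nil_append _)
  intro res q hq
  obtain ⟨l1, r1, l2, r2⟩ := q
  simp only at *
  by_cases hc : r1 - l1 = r2 - l2
  · rw [if_neg (by simpa using hc)]
    have hb := hpre (l1, r1, l2, r2) hq hc
    dsimp only at hb
    obtain ⟨h10, h1r, h1n, h20, h2r, h2n⟩ := hb
    rw [pvA_hash_eq pvBASE1 pvMOD1 (by norm_num [pvMOD1]) s.toList l1 r1 (r1 - l1 + 1) rfl h10 h1r h1n,
        pvA_hash_eq pvBASE1 pvMOD1 (by norm_num [pvMOD1]) s.toList l2 r2 (r1 - l1 + 1) (by omega) h20 h2r h2n,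
        pvA_hash_eq pvBASE2 pvMOD2 (by norm_num [pvMOD2]) s.toList l1 r1 (r1 - l1 + 1) rfl h10 h1r h1n,
        pvA_hash_eq pvBASE2 pvMOD2 (by norm_num [pvMOD2]) s.toList l2 r2 (r1 - l1 + 1) (by omega) h20 h2r h2n]
    rw [pvHsub_eq_seg s.toList pvBASE1 pvMOD1 l1 r1 h10 (by omega) h1n,
        pvHsub_eq_seg s.toList pvBASE1 pvMOD1 l2 r2 h20 (by omega) h2n,
        pvHsub_eq_seg s.toList pvBASE2 pvMOD2 l1 r1 h10 (by omega) h1n,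
        pvHsub_eq_seg s.toList pvBASE2 pvMOD2 l2 r2 h20 (by omega) h2n]
    simp [hc, Bool.decide_and]
  · rw [if_pos (by simpa using hc)]
    simp [hc]
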